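-- pv_equiv track=rewrite | github.com/mbellary/Python---DS-Algorithms | Arrays/prefix_sum/split_arrays.py | find_valid_split_arrays
-- ===== SOURCE A (Python) =====
-- def find_valid_split_arrays(nums: list[int]) -> int:
--
-- 	prefix = [nums[0]]
-- 	for i in range(1, len(nums)):
-- 		prefix.append(nums[i] + prefix[-1])
--
-- 	ans = 0
-- 	for i in range(len(nums) - 1): # -1 to avoid splitting on last element
-- 		left_section = prefix[i]
-- 		right_section = prefix[-1] - prefix[i]  # prefix sum : (p[j] - p[i - 1]) or (p[j] - p[i] + nums[i]) (to handle out of bound index 0)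
--
-- 		if left_section >= right_section:
-- 			ans += 1
-- 	return ans
-- ===== SOURCE B (Python) =====
-- def find_valid_split_arrays(nums: list[int]) -> int:
--     total = sum(nums)
--
--     def go(seg, base):
--         # returns (sum of seg, valid split positions among seg, given sum `base` before it)
--         if not seg:
--             return (0, 0)
--         if len(seg) == 1:
--             return (seg[0], 1 if base + seg[0] >= total - (base + seg[0]) else 0)
--         m = len(seg) // 2
--         s_left, c_left = go(seg[:m], base)
--         s_right, c_right = go(seg[m:], base + s_left)
--         return (s_left + s_right, c_left + c_right)
--
--     return go(nums[:-1], 0)[1]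
-- ===== Notes on version B (the rewrite author's own statement) =====
-- stated objective: alternative
-- what changed: B counts valid splits by divide-and-conquer: it recursively halves the (last-element-dropped) list, threading the sum of everything to the left as a base, instead of building and indexing a prefix-sum array.
import Mathlib
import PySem

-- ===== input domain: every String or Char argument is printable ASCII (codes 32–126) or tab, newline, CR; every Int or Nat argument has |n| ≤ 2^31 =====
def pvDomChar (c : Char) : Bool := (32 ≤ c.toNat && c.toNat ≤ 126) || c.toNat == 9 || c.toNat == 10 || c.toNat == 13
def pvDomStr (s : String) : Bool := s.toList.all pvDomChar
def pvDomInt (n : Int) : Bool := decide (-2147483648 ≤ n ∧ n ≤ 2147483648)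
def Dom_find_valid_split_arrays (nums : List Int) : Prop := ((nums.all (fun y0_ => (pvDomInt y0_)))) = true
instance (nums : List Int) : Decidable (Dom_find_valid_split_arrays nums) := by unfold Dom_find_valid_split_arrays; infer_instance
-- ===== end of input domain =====

-- B replaces A's prefix-sum array by a divide-and-conquer recursion threading the left-context sum (objective: alternative).

-- ===== PORT A =====
def find_valid_split_arrays (nums : List Int) : Int :=
  match PySem.List.pyGet? nums 0 with
  | none => 0  -- unreachable under Pre_ (Python raises IndexError here)
  | some h0 =>
    -- `prefix` is a reserved word in Lean, so the Python variable is named pfx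
    let pfx := (PySem.List.pyRange 1 (nums.length : Int) 1).foldl
      (fun p i => p ++ [PySem.List.pyGetD nums i 0 + PySem.List.pyGetD p (-1) 0]) [h0]
    (PySem.List.pyRange 0 ((nums.length : Int) - 1) 1).foldl
      (fun ans i =>
        let left_section := PySem.List.pyGetD pfx i 0
        let right_section := PySem.List.pyGetD pfx (-1) 0 - PySem.List.pyGetD pfx i 0
        if left_section ≥ right_section then ans + 1 else ans) 0

-- ===== PORT B =====
-- helper go(seg, base); Python's seg[:m] / seg[m:] with 0 ≤ m ≤ len(seg) are exactly take m / drop m.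
-- fuel = seg.length bounds the recursion depth (each call strictly shortens seg); it only makes the
-- same computation structurally terminating, never changes a result.
def pvGo (total : Int) : Nat → List Int → Int → Int × Int
  | 0, _, _ => (0, 0)  -- unreachable: fuel ≥ seg.length at every call
  | fuel + 1, seg, base =>
    if h1 : seg = [] then (0, 0)
    else if seg.length = 1 then
      (seg.head h1, if base + seg.head h1 ≥ total - (base + seg.head h1) then 1 else 0)
    else
      let m := seg.length / 2
      let l := pvGo total fuel (seg.take m) base
      let r := pvGo total fuel (seg.drop m) (base + l.1)
      (l.1 + r.1, l.2 + r.2)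

def find_valid_split_arrays_alt (nums : List Int) : Int :=
  let total := nums.sum
  (pvGo total nums.dropLast.length nums.dropLast 0).2  -- nums[:-1]

-- ===== PRECONDITION & SPEC =====
-- Pre_ excludes only the empty list, on which A raises IndexError (nums[0] before any loop).
def Pre_find_valid_split_arrays (nums : List Int) : Prop := nums ≠ []
instance (nums : List Int) : Decidable (Pre_find_valid_split_arrays nums) := by unfold Pre_find_valid_split_arrays; infer_instance
def pvWitness_find_valid_split_arrays : List Int := [1, 2, -1]

def Spec_find_valid_split_arrays (nums : List Int) (out : Int) : Prop := out = find_valid_split_arrays_alt nums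
instance (nums : List Int) (out : Int) : Decidable (Spec_find_valid_split_arrays nums out) := by unfold Spec_find_valid_split_arrays; infer_instance

-- ===== CLAIM (what is proved, stated in full; the proofs are below) =====
def Claim_equal_find_valid_split_arrays : Prop := ∀ (nums : List Int), Dom_find_valid_split_arrays nums → Pre_find_valid_split_arrays nums → Spec_find_valid_split_arrays nums (find_valid_split_arrays nums)

-- ===== LEMMAS AND PROOFS =====

-- number of valid splits of l, with left sum started at s, against fixed total
def pvCount (total s : Int) : List Int → Int
  | [] => 0
  | x :: r => (if s + x ≥ total - (s + x) then 1 else 0) + pvCount total (s + x) r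

theorem pvCount_append (total s : Int) (l1 l2 : List Int) :
    pvCount total s (l1 ++ l2) = pvCount total s l1 + pvCount total (s + l1.sum) l2 := by
  induction l1 generalizing s with
  | nil => simp [pvCount]
  | cons y r ih =>
    simp only [List.cons_append, pvCount, ih, List.sum_cons]
    ring_nf

-- B's divide-and-conquer helper computes (sum, pvCount) whenever the fuel suffices
theorem pvGo_eq (total : Int) (fuel : Nat) (seg : List Int) (base : Int)
    (hf : seg.length ≤ fuel) :
    pvGo total fuel seg base = (seg.sum, pvCount total base seg) := by
  induction fuel generalizing seg base with
  | zero =>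
    have : seg = [] := by
      cases seg with
      | nil => rfl
      | cons a t => simp at hf
    subst this; simp [pvGo, pvCount]
  | succ fuel ih =>
    rw [pvGo]
    by_cases h1 : seg = []
    · subst h1; simp [pvCount]
    · by_cases h2 : seg.length = 1
      · simp only [dif_neg h1, if_pos h2]
        obtain ⟨x, t, rfl⟩ : ∃ x t, seg = x :: t := by
          cases seg with | nil => exact absurd rfl h1 | cons a t => exact ⟨a, t, rfl⟩
        have : t = [] := by simpa using h2
        subst this
        simp [pvCount]
      · simp only [dif_neg h1, if_neg h2]
        have hlen2 : seg.length ≥ 2 := by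
          cases seg with
          | nil => exact absurd rfl h1
          | cons a t => cases t with
            | nil => simp at h2
            | cons b u => simp only [List.length_cons]; omega
        have hm1 : (seg.take (seg.length / 2)).length ≤ fuel := by
          rw [List.length_take]; omega
        have hm2 : (seg.drop (seg.length / 2)).length ≤ fuel := by
          rw [List.length_drop]; omega
        rw [ih _ _ hm1, ih _ _ hm2]
        simp only
        have hsplit : seg = seg.take (seg.length / 2) ++ seg.drop (seg.length / 2) :=
          (List.take_append_drop _ _).symm
        rw [Prod.mk.injEq]
        constructor
        · conv_rhs => rw [hsplit]
          simp
        · conv_rhs => rw [hsplit, pvCount_append]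

-- entry j of A's prefix list: sum of the first j+1 elements
def pvS (nums : List Int) (j : Int) : Int := (nums.take (j.toNat + 1)).sum

theorem pvS_step (nums : List Int) (m : Nat) (hm : m < nums.length) :
    (nums.take m).sum + nums[m] = pvS nums m := by
  simp only [pvS, Int.toNat_natCast]
  rw [List.take_add_one, List.getElem?_eq_getElem hm]
  simp only [Option.toList_some, List.sum_append, List.sum_cons, List.sum_nil]
  ring

-- A's prefix-building fold yields the map of pvS over the index range
theorem pvPrefix_eq (nums : List Int) (h : nums ≠ []) :
    (PySem.List.pyRange 1 (nums.length : Int) 1).foldl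
      (fun p i => p ++ [PySem.List.pyGetD nums i 0 + PySem.List.pyGetD p (-1) 0]) [nums.head h]
    = (PySem.List.pyRange 0 (nums.length : Int) 1).map (pvS nums) := by
  have hlen : 1 ≤ nums.length := List.length_pos_of_ne_nil h
  have key : ∀ (d k : Nat), nums.length ≤ k + d → 1 ≤ k → k ≤ nums.length →
      (PySem.List.pyRange (k : Int) (nums.length : Int) 1).foldl
        (fun p i => p ++ [PySem.List.pyGetD nums i 0 + PySem.List.pyGetD p (-1) 0])
        ((PySem.List.pyRange 0 (k : Int) 1).map (pvS nums))
      = (PySem.List.pyRange 0 (nums.length : Int) 1).map (pvS nums) := by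
    intro d
    induction d with
    | zero =>
      intro k hd hk1 hkn
      have hk : k = nums.length := by omega
      subst hk
      have hnil : PySem.List.pyRange (nums.length : Int) (nums.length : Int) 1 = [] :=
        PySem.List.pyRange_one_eq_nil (le_refl _)
      rw [hnil]
      simp
    | succ d ih =>
      intro k hd hk1 hkn
      by_cases hkn' : k = nums.length
      · subst hkn'
        have hnil : PySem.List.pyRange (nums.length : Int) (nums.length : Int) 1 = [] :=
          PySem.List.pyRange_one_eq_nil (le_refl _)
        rw [hnil]
        simp
      · have hklt : k < nums.length := by omega
        have hcons : PySem.List.pyRange (k : Int) (nums.length : Int) 1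
            = (k : Int) :: PySem.List.pyRange ((k : Int) + 1) (nums.length : Int) 1 :=
          PySem.List.pyRange_one_cons (by exact_mod_cast hklt)
        rw [hcons, List.foldl_cons]
        have hsucc := PySem.List.pyRange_one_succ_right (show (0 : Int) ≤ (k : Int) - 1 by omega)
        rw [show ((k : Int) - 1) + 1 = (k : Int) by ring] at hsucc
        have hlast : PySem.List.pyGetD ((PySem.List.pyRange 0 (k : Int) 1).map (pvS nums)) (-1) 0
            = pvS nums ((k : Int) - 1) := by
          rw [hsucc, List.map_append]
          simp only [List.map_cons, List.map_nil]
          exact PySem.List.pyGetD_neg_one_append_singleton _ _ _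
        have hsucc2 := PySem.List.pyRange_one_succ_right (show (0 : Int) ≤ (k : Int) by omega)
        have h1 : pvS nums ((k : Int) - 1) = (nums.take k).sum := by
          simp only [pvS]
          congr 2
          omega
        have h2 : PySem.List.pyGetD nums (k : Int) 0 = nums[k] := by
          rw [PySem.List.pyGetD_natCast]
          exact List.getD_eq_getElem _ _ hklt
        have hstep :
            (PySem.List.pyRange 0 (k : Int) 1).map (pvS nums)
              ++ [PySem.List.pyGetD nums (k : Int) 0
                  + PySem.List.pyGetD ((PySem.List.pyRange 0 (k : Int) 1).map (pvS nums)) (-1) 0]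
            = (PySem.List.pyRange 0 ((k : Int) + 1) 1).map (pvS nums) := by
          rw [hlast, h1, h2, hsucc2, List.map_append]
          simp only [List.map_cons, List.map_nil]
          rw [List.append_cancel_left_eq]
          congr 1
          rw [add_comm, pvS_step nums k hklt]
        rw [hstep]
        have hcast : ((k : Int) + 1) = ((k + 1 : Nat) : Int) := by push_cast; ring
        rw [hcast]
        exact ih (k + 1) (by omega) (by omega) (by omega)
  have start : (PySem.List.pyRange 0 ((1 : Nat) : Int) 1).map (pvS nums) = [nums.head h] := by
    rw [show ((1 : Nat) : Int) = (0 : Int) + 1 by norm_num]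
    rw [PySem.List.pyRange_one_succ_right (le_refl 0)]
    rw [PySem.List.pyRange_one_eq_nil (le_refl 0)]
    simp only [List.nil_append, List.map_cons, List.map_nil, pvS]
    cases nums with
    | nil => exact absurd rfl h
    | cons a t => simp
  have hmain := key nums.length 1 (by omega) (by omega) hlen
  rw [start] at hmain
  exact_mod_cast hmain

-- A's counting fold over the first m indices equals pvCount over the first m elements
theorem pvA_count (nums : List Int) (total : Int) (m : Nat) (hm : m ≤ nums.length) :
    (PySem.List.pyRange 0 (m : Int) 1).foldl
      (fun ans i => if pvS nums i ≥ total - pvS nums i then ans + 1 else ans) 0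
    = pvCount total 0 (nums.take m) := by
  induction m with
  | zero => simp [pvCount]
  | succ m ih =>
    have hml : m < nums.length := by omega
    have hcast : ((m + 1 : Nat) : Int) = (m : Int) + 1 := by push_cast; ring
    rw [hcast, PySem.List.pyRange_one_succ_right (by exact_mod_cast Nat.zero_le m), List.foldl_append]
    rw [ih (by omega)]
    rw [List.take_add_one, List.getElem?_eq_getElem hml]
    simp only [Option.toList_some]
    rw [pvCount_append]
    simp only [List.foldl_cons, List.foldl_nil, zero_add]
    simp only [pvCount, add_zero]
    rw [pvS_step nums m hml]
    split_ifs <;> ring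

-- ===== VERDICT (by name: the statement is the Claim_ definition above) =====
theorem find_valid_split_arrays_spec : Claim_equal_find_valid_split_arrays := by
  intro nums _hdom hpre
  unfold Spec_find_valid_split_arrays
  cases nums with
  | nil => exact absurd rfl hpre
  | cons a t =>
    have hne : (a :: t) ≠ ([] : List Int) := by simp
    have hlen1 : 1 ≤ (a :: t).length := by simp
    simp only [find_valid_split_arrays, PySem.List.pyGet?_zero_cons]
    have hpfx := pvPrefix_eq (a :: t) hne
    simp only [List.head_cons] at hpfx
    rw [hpfx]
    -- last entry of the prefix list is the total sum
    have hsucc := PySem.List.pyRange_one_succ_right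
      (show (0 : Int) ≤ (((a :: t).length : Int) - 1) by
        have : (1 : Int) ≤ ((a :: t).length : Int) := by exact_mod_cast hlen1
        omega)
    rw [show (((a :: t).length : Int) - 1) + 1 = ((a :: t).length : Int) by ring] at hsucc
    have hlast : PySem.List.pyGetD
        ((PySem.List.pyRange 0 ((a :: t).length : Int) 1).map (pvS (a :: t))) (-1) 0
        = (a :: t).sum := by
      rw [hsucc, List.map_append]
      simp only [List.map_cons, List.map_nil]
      rw [PySem.List.pyGetD_neg_one_append_singleton _ _ _]
      simp only [pvS]
      rw [show ((((a :: t).length : Int) - 1).toNat + 1) = (a :: t).length by omega]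
      rw [List.take_length]
    -- replace the indexed lookups by pvS inside the counting fold
    have hcongr := PySem.List.foldl_congr_mem
      (l := PySem.List.pyRange 0 (((a :: t).length : Int) - 1) 1)
      (init := (0 : Int))
      (f := fun ans i =>
        if PySem.List.pyGetD ((PySem.List.pyRange 0 ((a :: t).length : Int) 1).map (pvS (a :: t))) i 0
            ≥ PySem.List.pyGetD ((PySem.List.pyRange 0 ((a :: t).length : Int) 1).map (pvS (a :: t))) (-1) 0
              - PySem.List.pyGetD ((PySem.List.pyRange 0 ((a :: t).length : Int) 1).map (pvS (a :: t))) i 0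
          then ans + 1 else ans)
      (g := fun ans i =>
        if pvS (a :: t) i ≥ (a :: t).sum - pvS (a :: t) i then ans + 1 else ans)
      (by
        intro acc i hi
        rw [PySem.List.mem_pyRange_one] at hi
        have hi0 : 0 ≤ i := hi.1
        have hilt : i < ((a :: t).length : Int) := by
          have := hi.2; omega
        beta_reduce
        rw [PySem.List.pyGetD_map_pyRange_of_nonneg _ _ _ _ hi0 hilt, hlast])
    rw [hcongr]
    have hcast : (((a :: t).length : Int) - 1) = (((a :: t).length - 1 : Nat) : Int) := by
      push_cast [Nat.cast_sub hlen1]; ring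
    rw [hcast, pvA_count (a :: t) ((a :: t).sum) ((a :: t).length - 1) (by omega)]
    -- reduce B
    show _ = (pvGo ((a :: t).sum) (a :: t).dropLast.length (a :: t).dropLast 0).2
    rw [pvGo_eq _ _ _ _ (le_refl _)]
    rw [List.dropLast_eq_take]
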